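-- pv_equiv track=rewrite | github.com/ekzm8523/CodingTestPractice | python/programmers/dev_matching3.py | solution
-- ===== SOURCE A (Python) =====
-- from collections import defaultdict
--
-- def solution(enroll, referral, seller, amount):
--     """
--     :param enroll: 판매원의 이름을 담은 배열
--     :param referral: 각 판매원을 다단계 조직에 참여시킨 다른 판매원의 이름을 담은 배열
--     :param seller: 판매량 집계 데이터의 판매원 이름을 나열한 배열
--     :param amount: 집계 데이터의 판매 수량을 나열한 배열
--     :return: 각 판매원이 득한 이익금을 나열한 배
--     """
--     answer = []
--     link_dic = defaultdict(str)
--     price_dic = defaultdict(int)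
--
--     for i, name in enumerate(referral):
--         if name == '-':
--             name = "king_jw"
--         link_dic[enroll[i]] = name
--
--     for name, price in zip(seller, amount):
--         price *= 100
--         while price > 0:
--             residual = price // 10
--             price_dic[name] += price - residual
--             price = residual
--             if link_dic[name] == 'king_jw' or residual == 0:
--                 break
--             name = link_dic[name]
--
--     for name in enroll:
--         answer.append(price_dic[name])
--
--     return answer
-- ===== SOURCE B (Python) =====
-- def solution(enroll, referral, seller, amount):
--     parent = {e: ("king_jw" if r == "-" else r) for e, r in zip(enroll, referral)}
--
--     def gain(node, price, target):
--         # profit `target` earns from a single sale of `price` starting at `node`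
--         if price <= 0:
--             return 0
--         residual = price // 10
--         mine = price - residual if node == target else 0
--         if parent.get(node, "") == "king_jw" or residual == 0:
--             return mine
--         return mine + gain(parent.get(node, ""), residual, target)
--
--     return [sum(gain(s, a * 100, e) for s, a in zip(seller, amount))
--             for e in enroll]
-- ===== Notes on version B (the rewrite author's own statement) =====
-- stated objective: alternative
-- what changed: B inverts the traversal: instead of simulating each sale into a shared mutable profit dict (sale-major, defaultdict accumulator), it computes each output entry independently as a pure sum -- for every enroll member it sums, over all sales, a recursive gain(node, price, target) function that returns that member's share of that one sale -- so no profit accumulator exists at all.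
import Mathlib
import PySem

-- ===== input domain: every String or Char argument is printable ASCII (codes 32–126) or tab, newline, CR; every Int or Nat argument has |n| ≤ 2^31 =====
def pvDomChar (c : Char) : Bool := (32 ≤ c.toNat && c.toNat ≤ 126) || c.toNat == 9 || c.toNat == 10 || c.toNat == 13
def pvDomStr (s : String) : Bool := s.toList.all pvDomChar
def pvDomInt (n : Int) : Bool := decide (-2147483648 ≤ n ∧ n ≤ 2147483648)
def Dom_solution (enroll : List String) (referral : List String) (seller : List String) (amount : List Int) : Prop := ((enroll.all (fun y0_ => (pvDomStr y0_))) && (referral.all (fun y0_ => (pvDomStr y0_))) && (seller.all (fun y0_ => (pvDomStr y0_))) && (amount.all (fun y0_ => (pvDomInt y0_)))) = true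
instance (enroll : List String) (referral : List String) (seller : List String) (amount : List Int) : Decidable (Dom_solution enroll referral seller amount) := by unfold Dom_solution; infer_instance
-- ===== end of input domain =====

-- B inverts the traversal: no profit accumulator at all — each output entry is computed independently
-- as a pure sum over the sales of a recursive per-sale gain function (objective: alternative; B trades
-- the shared dict for independent per-member sums and is not faster).

-- ===== PORT A =====
-- A's 'while price > 0' loop, with a fuel counter that only makes the recursion structural
-- (price.toNat + 1 steps always suffice: price shrinks strictly while positive).
-- defaultdict reads are modelled by getD (default "" / 0): the read's side effect of inserting the
-- default never changes any later read or the output.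
def pvALoopGo (link : PySem.Dict String String) : Nat → PySem.Dict String Int → String → Int → PySem.Dict String Int
  | 0, priceDic, _, _ => priceDic
  | fuel + 1, priceDic, name, price =>
    if 0 < price then
      let residual := PySem.Int.floordiv price 10
      let d := priceDic.insert name (priceDic.getD name 0 + (price - residual))
      if link.getD name "" == "king_jw" || residual == 0 then d
      else pvALoopGo link fuel d (link.getD name "") residual
    else priceDic

def pvALoop (link : PySem.Dict String String) (priceDic : PySem.Dict String Int)
    (name : String) (price : Int) : PySem.Dict String Int :=
  pvALoopGo link (price.toNat + 1) priceDic name price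

-- enroll[i] raises IndexError when referral is longer than enroll: those inputs are outside Pre_solution,
-- so the default "" of getD is never used under Pre_.
def solution (enroll : List String) (referral : List String) (seller : List String) (amount : List Int) : List Int :=
  let link : PySem.Dict String String :=
    (PySem.List.enumerate referral).foldl
      (fun d p => d.insert ((PySem.List.pyGet? enroll p.1).getD "")
        (if p.2 == "-" then "king_jw" else p.2)) PySem.Dict.empty
  let priceDic : PySem.Dict String Int :=
    (seller.zip amount).foldl (fun d p => pvALoop link d p.1 (p.2 * 100)) PySem.Dict.empty
  enroll.map (fun name => priceDic.getD name 0)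

-- ===== PORT B =====
-- gain(node, price, target) of Source B: the profit `target` earns from one sale of `price` starting at `node`.
-- Same fuel device: price.toNat + 1 recursion steps always suffice.
def pvGain (parent : PySem.Dict String String) : Nat → String → Int → String → Int
  | 0, _, _, _ => 0
  | fuel + 1, node, price, target =>
    if price ≤ 0 then 0
    else
      let residual := PySem.Int.floordiv price 10
      let mine := if node == target then price - residual else 0
      if parent.getD node "" == "king_jw" || residual == 0 then mine
      else mine + pvGain parent fuel (parent.getD node "") residual target

def solution_alt (enroll : List String) (referral : List String) (seller : List String) (amount : List Int) : List Int :=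
  let parent : PySem.Dict String String :=
    (enroll.zip referral).foldl
      (fun d p => d.insert p.1 (if p.2 == "-" then "king_jw" else p.2)) PySem.Dict.empty
  enroll.map (fun e =>
    ((seller.zip amount).map
      (fun p => pvGain parent ((p.2 * 100).toNat + 1) p.1 (p.2 * 100) e)).sum)

-- ===== PRECONDITION & SPEC =====
-- Pre_ excludes exactly the inputs where A raises IndexError (referral longer than enroll: 'enroll[i]' out of range).
def Pre_solution (enroll : List String) (referral : List String) (seller : List String) (amount : List Int) : Prop :=
  referral.length ≤ enroll.length
instance (enroll : List String) (referral : List String) (seller : List String) (amount : List Int) : Decidable (Pre_solution enroll referral seller amount) := by unfold Pre_solution; infer_instance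

def pvWitness_solution : List String × List String × List String × List Int :=
  (["john", "mary", "edward"], ["-", "john", "mary"], ["edward", "mary"], [3, 5])

def Spec_solution (enroll : List String) (referral : List String) (seller : List String) (amount : List Int) (out : List Int) : Prop := out = solution_alt enroll referral seller amount
instance (enroll : List String) (referral : List String) (seller : List String) (amount : List Int) (out : List Int) : Decidable (Spec_solution enroll referral seller amount out) := by unfold Spec_solution; infer_instance

-- ===== CLAIM (what is proved, stated in full; the proofs are below) =====
def Claim_equal_solution : Prop := ∀ (enroll : List String) (referral : List String) (seller : List String) (amount : List Int), Dom_solution enroll referral seller amount → Pre_solution enroll referral seller amount → Spec_solution enroll referral seller amount (solution enroll referral seller amount)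

-- ===== LEMMAS AND PROOFS =====

-- the divisor 10 is positive, so each division step shrinks a positive price (used for the fuel bounds)
lemma pv_res (p : Int) (h : 0 < p) : 0 ≤ PySem.Int.floordiv p 10 ∧ PySem.Int.floordiv p 10 < p := by
  rw [PySem.Int.floordiv_eq_ediv_of_pos (by omega)]
  have h1 := Int.ediv_le_self 10 (le_of_lt h)
  have h2 : 0 ≤ p / 10 := Int.ediv_nonneg (le_of_lt h) (by omega)
  refine ⟨h2, ?_⟩
  rcases lt_or_eq_of_le h1 with h3 | h3
  · exact h3
  · exfalso; have := Int.ediv_mul_le p (b := 10) (by omega); omega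

-- A's enumerate-and-index key/value pairs are B's zip pairs, once referral fits inside enroll.
lemma pv_link_pairs : ∀ (referral enroll pre : List String), referral.length ≤ enroll.length →
    (PySem.List.enumerate referral (pre.length : Int)).map
      (fun p => ((PySem.List.pyGet? (pre ++ enroll) p.1).getD "", if p.2 == "-" then "king_jw" else p.2))
    = (enroll.zip referral).map (fun p => (p.1, if p.2 == "-" then "king_jw" else p.2)) := by
  intro referral
  induction referral with
  | nil => intro enroll pre h; simp [PySem.List.enumerate]
  | cons r rs ih =>
    intro enroll pre h
    cases enroll with
    | nil => simp at h
    | cons e es =>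
      simp only [PySem.List.enumerate, List.map_cons, List.zip_cons_cons]
      congr 1
      · rw [PySem.List.pyGet?_append_length]; rfl
      · have hlen : (pre.length : Int) + 1 = (((pre ++ [e]).length : Nat) : Int) := by
          simp [List.length_append]
        have happ : pre ++ e :: es = (pre ++ [e]) ++ es := by simp
        rw [hlen, happ]
        exact ih es (pre ++ [e]) (by simp at h ⊢; omega)

-- A's climbing loop changes the entry of e by exactly B's gain of e for that sale
lemma pv_gain_loop (link : PySem.Dict String String) (e : String) :
    ∀ (fA : Nat) (price : Int) (fB : Nat), price.toNat < fA → price.toNat < fB →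
    ∀ (d : PySem.Dict String Int) (name : String),
    (pvALoopGo link fA d name price).getD e 0 = d.getD e 0 + pvGain link fB name price e := by
  intro fA
  induction fA with
  | zero => intro price fB hA; omega
  | succ fA ih =>
    intro price fB hA hB d name
    obtain ⟨fB', rfl⟩ : ∃ k, fB = k + 1 := ⟨fB - 1, by omega⟩
    by_cases hp : 0 < price
    · have hres := pv_res price hp
      have hins : (d.insert name (d.getD name 0 + (price - PySem.Int.floordiv price 10))).getD e 0
          = d.getD e 0 + (if name == e then price - PySem.Int.floordiv price 10 else 0) := by
        by_cases he : e = name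
        · subst he; simp [PySem.Dict.getD_insert_self]
        · have h0 : (name == e) = false := beq_eq_false_iff_ne.mpr (Ne.symm he)
          rw [PySem.Dict.getD_insert_of_ne _ _ _ he]; simp [h0]
      simp only [pvALoopGo, pvGain, if_pos hp, if_neg (not_le.mpr hp)]
      by_cases hstop : (link.getD name "" == "king_jw" || PySem.Int.floordiv price 10 == 0) = true
      · simp only [hstop, if_true, hins]
      · simp only [hstop, Bool.false_eq_true, if_false]
        rw [ih (PySem.Int.floordiv price 10) fB' (by omega) (by omega) _ _, hins]
        ring
    · simp only [pvALoopGo, pvGain, if_neg hp, if_pos (not_lt.mp hp)]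
      omega

-- folding the sales through A's loop adds, entrywise, the sum of B's gains
lemma pv_fold_gain (link : PySem.Dict String String) (e : String) :
    ∀ (sales : List (String × Int)) (d : PySem.Dict String Int),
    (sales.foldl (fun d p => pvALoop link d p.1 (p.2 * 100)) d).getD e 0
    = d.getD e 0 + (sales.map (fun p => pvGain link ((p.2 * 100).toNat + 1) p.1 (p.2 * 100) e)).sum := by
  intro sales
  induction sales with
  | nil => intro d; simp
  | cons p t ih =>
    intro d
    simp only [List.foldl_cons, List.map_cons, List.sum_cons]
    rw [ih, pvALoop, pv_gain_loop link e ((p.2 * 100).toNat + 1) (p.2 * 100) ((p.2 * 100).toNat + 1) (Nat.lt_succ_self _) (Nat.lt_succ_self _)]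
    ring

-- ===== VERDICT (by name: the statement is the Claim_ definition above) =====
theorem solution_spec : Claim_equal_solution := by
  intro enroll referral seller amount _ hpre
  unfold Spec_solution solution solution_alt
  have h1 := pv_link_pairs referral enroll [] hpre
  simp only [List.nil_append, List.length_nil, Nat.cast_zero] at h1
  have hlink :
      (PySem.List.enumerate referral).foldl
        (fun d p => d.insert ((PySem.List.pyGet? enroll p.1).getD "")
          (if p.2 == "-" then "king_jw" else p.2)) PySem.Dict.empty
      = (enroll.zip referral).foldl
        (fun d p => d.insert p.1 (if p.2 == "-" then "king_jw" else p.2)) PySem.Dict.empty := by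
    calc (PySem.List.enumerate referral).foldl
          (fun d p => d.insert ((PySem.List.pyGet? enroll p.1).getD "")
            (if p.2 == "-" then "king_jw" else p.2)) PySem.Dict.empty
        = ((PySem.List.enumerate referral).map
            (fun p => ((PySem.List.pyGet? enroll p.1).getD "",
              if p.2 == "-" then "king_jw" else p.2))).foldl
            (fun d q => d.insert q.1 q.2) PySem.Dict.empty :=
          (List.foldl_map
            (f := fun p : Int × String => ((PySem.List.pyGet? enroll p.1).getD "",
              if p.2 == "-" then "king_jw" else p.2))
            (g := fun (d : PySem.Dict String String) (q : String × String) => d.insert q.1 q.2)).symm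
      _ = ((enroll.zip referral).map
            (fun p => (p.1, if p.2 == "-" then "king_jw" else p.2))).foldl
            (fun d q => d.insert q.1 q.2) PySem.Dict.empty := by rw [h1]
      _ = (enroll.zip referral).foldl
            (fun d p => d.insert p.1 (if p.2 == "-" then "king_jw" else p.2))
            PySem.Dict.empty :=
          List.foldl_map
            (f := fun p : String × String => (p.1, if p.2 == "-" then "king_jw" else p.2))
            (g := fun (d : PySem.Dict String String) (q : String × String) => d.insert q.1 q.2)
  rw [hlink]
  refine List.map_congr_left (fun e _ => ?_)
  rw [pv_fold_gain _ e (seller.zip amount) PySem.Dict.empty]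
  simp [PySem.Dict.getD_empty]
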